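-- pv_equiv track=rewrite | github.com/kzay/hummingbot-trading | hbot/scripts/analysis/testnet_daily_scorecard.py | _hard_stop_incidents
-- ===== SOURCE A (Python) =====
-- from typing import Dict, Iterable, List
--
-- def _is_truthy(value: object) -> bool:
--     return str(value or "").strip().lower() in {"1", "true", "yes", "on", "y"}
--
-- def _hard_stop_incidents(rows: List[Dict[str, str]]) -> tuple[int, int]:
--     """Return (hard_stop_row_count, hard_stop_transition_count)."""
--     hard_stop_row_count = 0
--     hard_stop_transition_count = 0
--     was_hard_stop = False
--     for row in rows:
--         state = str(row.get("state", "")).strip().lower()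
--         hard_stop_now = (
--             state == "hard_stop"
--             or _is_truthy(row.get("hard_stop"))
--             or _is_truthy(row.get("is_hard_stop"))
--         )
--         if hard_stop_now:
--             hard_stop_row_count += 1
--         if hard_stop_now and not was_hard_stop:
--             hard_stop_transition_count += 1
--         was_hard_stop = hard_stop_now
--     return hard_stop_row_count, hard_stop_transition_count
-- ===== SOURCE B (Python) =====
-- from typing import Dict, Iterable, List
--
-- def _is_truthy(value: object) -> bool:
--     return str(value or "").strip().lower() in {"1", "true", "yes", "on", "y"}
--
-- def _row_is_hard_stop(row: Dict[str, str]) -> bool: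
--     state = str(row.get("state", "")).strip().lower()
--     return (
--         state == "hard_stop"
--         or _is_truthy(row.get("hard_stop"))
--         or _is_truthy(row.get("is_hard_stop"))
--     )
--
-- def _hard_stop_incidents(rows: List[Dict[str, str]]) -> tuple[int, int]:
--     """Return (hard_stop_row_count, hard_stop_transition_count).
--
--     Run-length view: materialize the flag list, then scan it as maximal runs
--     of True with a two-pointer loop; each True run contributes its length to
--     the row count and exactly one transition.
--     """
--     flags = [_row_is_hard_stop(row) for row in rows]
--     total = 0
--     runs = 0
--     n = len(flags)
--     i = 0
--     while i < n:
--         if not flags[i]: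
--             i += 1
--             continue
--         j = i
--         while j < n and flags[j]:
--             j += 1
--         total += j - i
--         runs += 1
--         i = j
--     return total, runs
-- ===== Notes on version B (the rewrite author's own statement) =====
-- stated objective: alternative
-- what changed: Replaces A's fused stateful loop (counters plus a was_hard_stop flag) by a run-length view: materialize the boolean flag list, then scan it with a two-pointer loop over maximal True runs, where the row count is the sum of run lengths and the transition count is simply the number of runs (no previous-flag comparison anywhere).
import Mathlib
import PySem

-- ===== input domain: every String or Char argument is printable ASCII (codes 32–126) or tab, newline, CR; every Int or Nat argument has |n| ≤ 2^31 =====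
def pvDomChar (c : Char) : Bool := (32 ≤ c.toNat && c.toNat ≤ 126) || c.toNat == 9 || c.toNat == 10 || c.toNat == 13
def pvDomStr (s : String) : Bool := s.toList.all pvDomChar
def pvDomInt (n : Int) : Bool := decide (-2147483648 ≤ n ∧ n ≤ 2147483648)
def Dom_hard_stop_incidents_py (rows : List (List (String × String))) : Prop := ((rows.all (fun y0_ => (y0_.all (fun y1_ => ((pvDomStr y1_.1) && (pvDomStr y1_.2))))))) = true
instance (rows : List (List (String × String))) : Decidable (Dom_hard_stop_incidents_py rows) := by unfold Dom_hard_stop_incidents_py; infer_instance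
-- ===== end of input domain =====

-- B replaces A's fused stateful loop by a run-length scan over a materialized flag list:
-- each maximal True run contributes its length to the row count and one transition (alternative decomposition; same cost).

-- ===== PORT A =====
-- _is_truthy(value): value is row.get(k) : Option String; 'value or ""' is getD "" (None and "" both yield "")
def isTruthyA (v : Option String) : Bool :=
  ["1", "true", "yes", "on", "y"].contains (PySem.Str.lower (PySem.Str.strip (v.getD "")))

-- the for-loop of A, state (hard_stop_row_count, hard_stop_transition_count, was_hard_stop)
def loopA : List (List (String × String)) → Int → Int → Bool → Int × Int
  | [], c, t, _ => (c, t)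
  | row :: rest, c, t, w =>
    let state := PySem.Str.lower (PySem.Str.strip (PySem.Dict.getD (PySem.Dict.mk row) "state" ""))
    let now := (state == "hard_stop")
      || isTruthyA (PySem.Dict.get? (PySem.Dict.mk row) "hard_stop")
      || isTruthyA (PySem.Dict.get? (PySem.Dict.mk row) "is_hard_stop")
    loopA rest (if now then c + 1 else c) (if now && !w then t + 1 else t) now

def hard_stop_incidents_py (rows : List (List (String × String))) : Int × Int :=
  loopA rows 0 0 false

-- ===== PORT B =====
def isTruthyB (v : Option String) : Bool :=
  ["1", "true", "yes", "on", "y"].contains (PySem.Str.lower (PySem.Str.strip (v.getD "")))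

def rowIsHardStopB (row : List (String × String)) : Bool :=
  (PySem.Str.lower (PySem.Str.strip (PySem.Dict.getD (PySem.Dict.mk row) "state" "")) == "hard_stop")
  || isTruthyB (PySem.Dict.get? (PySem.Dict.mk row) "hard_stop")
  || isTruthyB (PySem.Dict.get? (PySem.Dict.mk row) "is_hard_stop")

-- Source B's inner 'while j < n and flags[j]: j += 1': length of the leading True run and the remainder
def spanTrueB : List Bool → Int × List Bool
  | true :: fs => let p := spanTrueB fs; (p.1 + 1, p.2)
  | fs => (0, fs)

lemma spanTrueB_length : ∀ l : List Bool, (spanTrueB l).2.length ≤ l.length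
  | [] => le_refl _
  | true :: fs => by simpa [spanTrueB] using Nat.le_succ_of_le (spanTrueB_length fs)
  | false :: fs => by simp [spanTrueB]

-- Source B's outer while loop over the flag suffix starting at index i, as structural recursion:
-- skip a False, or consume one maximal True run (adding its length and one transition)
def runScanB : List Bool → Int × Int
  | [] => (0, 0)
  | false :: fs => runScanB fs
  | true :: fs =>
      let p := spanTrueB fs
      let q := runScanB p.2
      (q.1 + p.1 + 1, q.2 + 1)
termination_by l => l.length
decreasing_by
  · simp
  · simpa using Nat.lt_succ_of_le (spanTrueB_length fs)

def hard_stop_incidents_py_alt (rows : List (List (String × String))) : Int × Int :=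
  runScanB (rows.map rowIsHardStopB)

-- ===== PRECONDITION & SPEC =====
def Spec_hard_stop_incidents_py (rows : List (List (String × String))) (out : Int × Int) : Prop := out = hard_stop_incidents_py_alt rows
instance (rows : List (List (String × String))) (out : Int × Int) : Decidable (Spec_hard_stop_incidents_py rows out) := by unfold Spec_hard_stop_incidents_py; infer_instance

-- ===== CLAIM (what is proved, stated in full; the proofs are below) =====
def Claim_equal_hard_stop_incidents_py : Prop := ∀ (rows : List (List (String × String))), Dom_hard_stop_incidents_py rows → Spec_hard_stop_incidents_py rows (hard_stop_incidents_py rows)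

-- ===== LEMMAS AND PROOFS =====

-- the edge A's loop would NOT count because was_hard_stop is already set
def adjE (w : Bool) (flags : List Bool) : Int :=
  if w then (match flags with | true :: _ => 1 | _ => 0) else 0

lemma loopA_cons (r : List (String × String)) (rs : List (List (String × String)))
    (c t : Int) (w : Bool) :
    loopA (r :: rs) c t w =
      loopA rs (if rowIsHardStopB r then c + 1 else c)
        (if rowIsHardStopB r && !w then t + 1 else t) (rowIsHardStopB r) := by
  simp only [loopA, rowIsHardStopB, isTruthyA, isTruthyB]
  rfl

-- decompose runScanB of any list via its leading True run
lemma runScanB_span (fl : List Bool) :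
    runScanB fl =
      ((runScanB (spanTrueB fl).2).1 + (spanTrueB fl).1,
       (runScanB (spanTrueB fl).2).2 + adjE true fl) := by
  match fl with
  | [] => simp [runScanB, spanTrueB, adjE]
  | false :: fs => simp [runScanB, spanTrueB, adjE]
  | true :: fs =>
      simp only [runScanB, spanTrueB, adjE]
      exact Prod.ext (by ring) rfl

lemma loopA_runScan (rows : List (List (String × String))) (c t : Int) (w : Bool) :
    loopA rows c t w =
      (c + (runScanB (rows.map rowIsHardStopB)).1,
       t + (runScanB (rows.map rowIsHardStopB)).2 - adjE w (rows.map rowIsHardStopB)) := by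
  induction rows generalizing c t w with
  | nil => simp [loopA, runScanB, adjE]
  | cons r rs ih =>
      rw [loopA_cons, ih, List.map_cons]
      cases h : rowIsHardStopB r with
      | false =>
          simp only [runScanB, adjE]
          cases w <;> simp
      | true =>
          have hd := runScanB_span (rs.map rowIsHardStopB)
          simp only [runScanB]
          rw [hd]
          cases w <;> simp [adjE] <;> constructor <;> ring

-- ===== VERDICT (by name: the statement is the Claim_ definition above) =====
theorem hard_stop_incidents_py_spec : Claim_equal_hard_stop_incidents_py := by
  intro rows _
  unfold Spec_hard_stop_incidents_py hard_stop_incidents_py hard_stop_incidents_py_alt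
  rw [loopA_runScan]
  simp [adjE]
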